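-- pv_equiv track=rewrite | github.com/wan-catherine/Leetcode | problems/N2503_Maximum_Number_Of_Points_From_Grid_Queries.py | maxPoints_20250328
-- ===== SOURCE A (Python) =====
-- from typing import List
--
-- def maxPoints_20250328(grid: List[List[int]], queries: List[int]) -> List[int]:
--     rows, cols = len(grid), len(grid[0])
--     directions = [(0, 1), (0, -1), (1, 0), (-1, 0)]
--     lq = len(queries)
--     que = [(queries[i], i) for i in range(lq)]
--     que.sort(key=lambda x: x[0])
--     res = [0] * lq
--     cur = 0
--     stack = [(0,0)]
--     visited = [[False] * cols for _ in range(rows)]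
--     visited[0][0] = True
--     memo = {}
--     for v, idx in que:
--         if v in memo:
--             res[idx] = memo[v]
--             continue
--         left = []
--         while True:
--             nstack = []
--             for r, c in stack:
--                 if grid[r][c] >= v:
--                     left.append((r, c))
--                     continue
--                 cur += 1
--                 for i, j in directions:
--                     row, col = r + i, c + j
--                     if row < 0 or row >= rows or col < 0 or col >= cols or visited[row][col]:
--                         continue
--                     nstack.append((row, col))
--                     visited[row][col] = True
--             if not nstack:
--                 break
--             stack = nstack
--         stack = left
--         memo[v] = cur
--         res[idx] = cur
--     return res
-- ===== SOURCE B (Python) =====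
-- from typing import List
--
-- def maxPoints_20250328(grid: List[List[int]], queries: List[int]) -> List[int]:
--     rows, cols = len(grid), len(grid[0])
--     S = set()
--     memo = {}
--     for v in sorted(set(queries)):
--         if grid[0][0] < v:
--             S.add((0, 0))
--             while True:
--                 T = {(r, c)
--                      for r in range(rows) for c in range(cols)
--                      if (r, c) not in S and grid[r][c] < v
--                      and ((r - 1, c) in S or (r + 1, c) in S
--                           or (r, c - 1) in S or (r, c + 1) in S)}
--                 if not T:
--                     break
--                 S |= T
--         memo[v] = len(S)
--     return [memo[v] for v in queries]
-- ===== Notes on version B (the rewrite author's own statement) =====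
-- stated objective: alternative
-- what changed: A's incremental wavefront BFS (explicit frontier stack, visited boolean matrix, running counter, results scattered into res by original index) is replaced by whole-grid saturation sweeps over a Python set of cells, run warm-started per distinct query value in ascending sorted order, with answers looked up from a dict.
-- outside the precondition, e.g. on maxPoints_20250328([[0, 5], [7]], [1]): A returns [1], B raises IndexError
import Mathlib
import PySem

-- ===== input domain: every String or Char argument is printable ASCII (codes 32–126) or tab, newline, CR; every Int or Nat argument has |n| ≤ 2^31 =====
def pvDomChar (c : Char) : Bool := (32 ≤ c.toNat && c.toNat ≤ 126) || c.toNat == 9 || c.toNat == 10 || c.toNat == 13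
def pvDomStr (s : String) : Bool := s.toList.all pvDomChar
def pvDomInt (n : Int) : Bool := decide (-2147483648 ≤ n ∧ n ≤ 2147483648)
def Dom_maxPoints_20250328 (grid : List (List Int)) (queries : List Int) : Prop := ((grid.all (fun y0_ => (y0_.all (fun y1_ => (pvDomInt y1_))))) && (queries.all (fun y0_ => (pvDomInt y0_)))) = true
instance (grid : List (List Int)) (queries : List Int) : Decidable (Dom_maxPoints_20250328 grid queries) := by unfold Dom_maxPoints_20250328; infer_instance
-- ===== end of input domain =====

-- B replaces A's per-query wavefront BFS (explicit frontier stack + visited matrix, incremental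
-- counter scattered into res by original index) by whole-grid saturation sweeps over a Python set,
-- run once per distinct query value in ascending order; objective: alternative (not faster).

-- ===== PORT A =====
-- grid[r][c] / visited[r][c]; exact for in-range indices — out-of-range reads (Python IndexError) are excluded by Pre_.
def pvGridAt (grid : List (List Int)) (r c : Int) : Int :=
  ((PySem.List.pyGet? grid r).bind (fun row => PySem.List.pyGet? row c)).getD 0

def pvVisAt (vis : List (List Bool)) (r c : Int) : Bool :=
  ((PySem.List.pyGet? vis r).bind (fun row => PySem.List.pyGet? row c)).getD false

-- visited[r][c] = True
def pvVisSet (vis : List (List Bool)) (r c : Int) : List (List Bool) :=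
  PySem.List.pySetD vis r (PySem.List.pySetD (PySem.List.pyGetD vis r []) c true)

def pvDirections : List (Int × Int) := [(0, 1), (0, -1), (1, 0), (-1, 0)]

-- body of 'for i, j in directions'
def pvDirStep (rows cols r c : Int) (st : List (Int × Int) × List (List Bool)) (d : Int × Int) :
    List (Int × Int) × List (List Bool) :=
  let row := r + d.1
  let col := c + d.2
  if row < 0 ∨ rows ≤ row ∨ col < 0 ∨ cols ≤ col ∨ pvVisAt st.2 row col then st
  else (st.1 ++ [(row, col)], pvVisSet st.2 row col)

-- body of 'for r, c in stack'; state = (left, cur, nstack, visited)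
def pvCellStep (grid : List (List Int)) (rows cols v : Int)
    (st : List (Int × Int) × Int × List (Int × Int) × List (List Bool)) (rc : Int × Int) :
    List (Int × Int) × Int × List (Int × Int) × List (List Bool) :=
  if v ≤ pvGridAt grid rc.1 rc.2 then (st.1 ++ [rc], st.2.1, st.2.2.1, st.2.2.2)
  else
    let cur := st.2.1 + 1
    let r := pvDirections.foldl (pvDirStep rows cols rc.1 rc.2) (st.2.2.1, st.2.2.2)
    (st.1, cur, r.1, r.2)

-- 'while True: …' — fuel only makes the loop total; it is proved sufficient below.
def pvWaveLoop (grid : List (List Int)) (rows cols v : Int) :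
    Nat → List (Int × Int) × Int × List (Int × Int) × List (List Bool) →
    List (Int × Int) × Int × List (List Bool)
  | 0, st => (st.1, st.2.1, st.2.2.2)
  | fuel + 1, st =>
    let r := st.2.2.1.foldl (pvCellStep grid rows cols v) (st.1, st.2.1, [], st.2.2.2)
    if r.2.2.1 = [] then (r.1, r.2.1, r.2.2.2)
    else pvWaveLoop grid rows cols v fuel (r.1, r.2.1, r.2.2.1, r.2.2.2)

-- body of 'for v, idx in que'; state = (cur, stack, visited, memo, res)
def pvQueryStep (grid : List (List Int)) (rows cols : Int)
    (st : Int × List (Int × Int) × List (List Bool) × PySem.Dict Int Int × List Int)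
    (vi : Int × Int) :
    Int × List (Int × Int) × List (List Bool) × PySem.Dict Int Int × List Int :=
  let (cur, stack, vis, memo, res) := st
  match memo.get? vi.1 with
  | some m => (cur, stack, vis, memo, PySem.List.pySetD res vi.2 m)
  | none =>
    let r := pvWaveLoop grid rows cols vi.1 (grid.length * (grid.headD []).length + 1)
      ([], cur, stack, vis)
    (r.2.1, r.1, r.2.2, memo.insert vi.1 r.2.1, PySem.List.pySetD res vi.2 r.2.1)

def maxPoints_20250328 (grid : List (List Int)) (queries : List Int) : List Int :=
  let rows : Int := grid.length
  let cols : Int := (grid.headD []).length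
  let lq : Int := queries.length
  let que := (PySem.List.pyRange 0 lq 1).map (fun i => (PySem.List.pyGetD queries i 0, i))
  let que := PySem.List.sorted que (fun x => x.1) false
  let res : List Int := List.replicate queries.length 0
  let vis0 := List.replicate grid.length (List.replicate (grid.headD []).length false)
  let vis0 := pvVisSet vis0 0 0
  let st := que.foldl (pvQueryStep grid rows cols) (0, [(0, 0)], vis0, PySem.Dict.empty, res)
  st.2.2.2.2

-- ===== PORT B =====
-- the set comprehension building T (its elements are pairwise distinct, so the list is the set)
def pvSweep (grid : List (List Int)) (rows cols v : Int) (S : PySem.Set (Int × Int)) :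
    List (Int × Int) :=
  (((PySem.List.pyRange 0 rows 1).flatMap
      (fun r => (PySem.List.pyRange 0 cols 1).map (fun c => (r, c)))).filter
    (fun rc => !(PySem.Set.contains S rc) && decide (pvGridAt grid rc.1 rc.2 < v) &&
      (PySem.Set.contains S (rc.1 - 1, rc.2) || PySem.Set.contains S (rc.1 + 1, rc.2) ||
       PySem.Set.contains S (rc.1, rc.2 - 1) || PySem.Set.contains S (rc.1, rc.2 + 1))))

-- 'while True: …' of B — fuel only makes the loop total; it is proved sufficient below.
def pvSatLoop (grid : List (List Int)) (rows cols v : Int) :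
    Nat → PySem.Set (Int × Int) → PySem.Set (Int × Int)
  | 0, S => S
  | fuel + 1, S =>
    let T := pvSweep grid rows cols v S
    if T = [] then S else pvSatLoop grid rows cols v fuel (PySem.Set.union S T)

-- body of 'for v in sorted(set(queries))'; state = (S, memo)
def pvAltStep (grid : List (List Int)) (rows cols : Int)
    (st : PySem.Set (Int × Int) × PySem.Dict Int Int) (v : Int) :
    PySem.Set (Int × Int) × PySem.Dict Int Int :=
  let S := if pvGridAt grid 0 0 < v then
      pvSatLoop grid rows cols v (grid.length * (grid.headD []).length + 1)
        (PySem.Set.add st.1 (0, 0))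
    else st.1
  (S, st.2.insert v (S.length : Int))

def maxPoints_20250328_alt (grid : List (List Int)) (queries : List Int) : List Int :=
  let rows : Int := grid.length
  let cols : Int := (grid.headD []).length
  let vals := PySem.List.sorted (PySem.Set.ofList queries) (fun x => x) false
  let st := vals.foldl (pvAltStep grid rows cols) (PySem.Set.empty, PySem.Dict.empty)
  queries.map (fun v => st.2.getD v 0)

-- ===== PRECONDITION & SPEC =====
-- A raises IndexError when the grid is empty, its first row is empty, or the flood fill visits a
-- cell beyond the end of a short row; Pre_ therefore requires a nonempty first row and either no
-- row shorter than the first, or queries that never start the fill (empty, or all ≤ grid[0][0]).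
-- This still excludes some ragged grids on which A happens to return because the short rows'
-- missing cells are never visited (see the cite in claim.json): B's sweep reads every cell.
def Pre_maxPoints_20250328 (grid : List (List Int)) (queries : List Int) : Prop :=
  grid ≠ [] ∧ grid.headD [] ≠ [] ∧
    ((∀ row ∈ grid, (grid.headD []).length ≤ row.length) ∨ queries = [] ∨
      ∀ v ∈ queries, v ≤ (grid.headD []).headD 0)

instance (grid : List (List Int)) (queries : List Int) :
    Decidable (Pre_maxPoints_20250328 grid queries) := by
  unfold Pre_maxPoints_20250328; infer_instance

def pvWitness_maxPoints_20250328 : List (List Int) × List Int :=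
  ([[1, 2, 3], [2, 5, 7], [3, 5, 1]], [5, 6, 2])

def Spec_maxPoints_20250328 (grid : List (List Int)) (queries : List Int) (out : List Int) : Prop :=
  out = maxPoints_20250328_alt grid queries

instance (grid : List (List Int)) (queries : List Int) (out : List Int) :
    Decidable (Spec_maxPoints_20250328 grid queries out) := by
  unfold Spec_maxPoints_20250328; infer_instance

-- ===== CLAIM (what is proved, stated in full; the proofs are below) =====
def Claim_equal_maxPoints_20250328 : Prop := ∀ (grid : List (List Int)) (queries : List Int), Dom_maxPoints_20250328 grid queries → Pre_maxPoints_20250328 grid queries → Spec_maxPoints_20250328 grid queries (maxPoints_20250328 grid queries)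

-- ===== LEMMAS AND PROOFS =====

-- ===== proof-layer definitions =====
def pvRows (grid : List (List Int)) : Int := (grid.length : Int)
def pvCols (grid : List (List Int)) : Int := ((grid.headD []).length : Int)
def pvN (grid : List (List Int)) : Nat := grid.length * (grid.headD []).length
def pvPre (grid : List (List Int)) : Prop :=
  grid ≠ [] ∧ grid.headD [] ≠ []
def pvInb (grid : List (List Int)) (p : Int × Int) : Prop :=
  0 ≤ p.1 ∧ p.1 < pvRows grid ∧ 0 ≤ p.2 ∧ p.2 < pvCols grid
def pvNbr (p q : Int × Int) : Prop :=
  (q.1 = p.1 + 1 ∧ q.2 = p.2) ∨ (q.1 = p.1 - 1 ∧ q.2 = p.2) ∨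
  (q.1 = p.1 ∧ q.2 = p.2 + 1) ∨ (q.1 = p.1 ∧ q.2 = p.2 - 1)
def pvVal (grid : List (List Int)) (p : Int × Int) : Int := pvGridAt grid p.1 p.2
def pvGood (grid : List (List Int)) (v : Int) (S : List (Int × Int)) : Prop :=
  ∀ p, pvInb grid p → pvVal grid p < v → (p = (0, 0) ∨ ∃ q ∈ S, pvNbr q p) → p ∈ S
def pvAll (grid : List (List Int)) : List (Int × Int) :=
  (PySem.List.pyRange 0 (pvRows grid) 1).flatMap
    (fun r => (PySem.List.pyRange 0 (pvCols grid) 1).map (fun c => (r, c)))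
def pvReach (grid : List (List Int)) (v : Int) : List (Int × Int) :=
  pvSatLoop grid (pvRows grid) (pvCols grid) v (pvN grid + 1)
    (if pvVal grid (0, 0) < v then [(0, 0)] else [])

theorem mem_pvAll (grid : List (List Int)) (p : Int × Int) :
    p ∈ pvAll grid ↔ pvInb grid p := by
  unfold pvAll pvInb
  simp [List.mem_flatMap, PySem.List.mem_pyRange_one]
  constructor
  · rintro ⟨r, hr, c, hc, rfl⟩; exact ⟨hr.1, hr.2, hc.1, hc.2⟩
  · rintro ⟨h1, h2, h3, h4⟩; exact ⟨p.1, ⟨h1, h2⟩, p.2, ⟨h3, h4⟩, rfl⟩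

theorem nodup_pvAll (grid : List (List Int)) : (pvAll grid).Nodup := by
  unfold pvAll
  apply List.nodup_flatMap.2
  refine ⟨fun r _ => ?_, ?_⟩
  · exact (PySem.List.nodup_pyRange_one _ _).map (fun a b h => by simpa using congrArg Prod.snd h)
  · refine (PySem.List.nodup_pyRange_one _ _).imp ?_
    intro a b hab
    simp only [List.Disjoint, List.mem_map]
    rintro x ⟨c, _, rfl⟩ ⟨c', _, h⟩
    exact hab (by simpa using (congrArg Prod.fst h).symm)

theorem pvLen_le (grid : List (List Int)) (S : List (Int × Int)) (hnd : S.Nodup)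
    (hsub : ∀ p ∈ S, pvInb grid p) : S.length ≤ pvN grid := by
  have h1 : S.toFinset ⊆ (pvAll grid).toFinset := by
    intro p hp
    simp only [List.mem_toFinset] at *
    exact (mem_pvAll grid p).2 (hsub p hp)
  have h2 := Finset.card_le_card h1
  rw [List.toFinset_card_of_nodup hnd, List.toFinset_card_of_nodup (nodup_pvAll grid)] at h2
  calc S.length ≤ (pvAll grid).length := h2
    _ = pvN grid := by
      unfold pvAll pvN
      rw [List.length_flatMap]
      simp [PySem.List.length_pyRange_one, pvRows, pvCols, Int.toNat_natCast]
theorem mem_pvSweep (grid : List (List Int)) (v : Int) (S : PySem.Set (Int × Int))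
    (q : Int × Int) :
    q ∈ pvSweep grid (pvRows grid) (pvCols grid) v S ↔
      pvInb grid q ∧ q ∉ S ∧ pvVal grid q < v ∧ ∃ p ∈ S, pvNbr p q := by
  unfold pvSweep
  rw [List.mem_filter]
  have hall : ((PySem.List.pyRange 0 (pvRows grid) 1).flatMap
      (fun r => (PySem.List.pyRange 0 (pvCols grid) 1).map (fun c => (r, c)))) = pvAll grid := rfl
  rw [hall, mem_pvAll]
  simp only [Bool.and_eq_true, Bool.or_eq_true, Bool.not_eq_true', decide_eq_true_eq,
    PySem.Set.contains_eq_listContains]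
  constructor
  · rintro ⟨hinb, ⟨⟨hns, hval⟩, hnb⟩⟩
    refine ⟨hinb, by simpa using hns, hval, ?_⟩
    rcases hnb with ((h | h) | h) | h
    · exact ⟨(q.1 - 1, q.2), by simpa using h, by unfold pvNbr; dsimp; omega⟩
    · exact ⟨(q.1 + 1, q.2), by simpa using h, by unfold pvNbr; dsimp; omega⟩
    · exact ⟨(q.1, q.2 - 1), by simpa using h, by unfold pvNbr; dsimp; omega⟩
    · exact ⟨(q.1, q.2 + 1), by simpa using h, by unfold pvNbr; dsimp; omega⟩
  · rintro ⟨hinb, hns, hval, p, hp, hnbr⟩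
    refine ⟨hinb, ⟨⟨by simpa using hns, hval⟩, ?_⟩⟩
    unfold pvNbr at hnbr
    have hq : p = (q.1 - 1, q.2) ∨ p = (q.1 + 1, q.2) ∨ p = (q.1, q.2 - 1) ∨ p = (q.1, q.2 + 1) := by
      rcases p with ⟨a, b⟩; rcases q with ⟨c, d⟩; dsimp at hnbr ⊢
      rcases hnbr with ⟨h1, h2⟩ | ⟨h1, h2⟩ | ⟨h1, h2⟩ | ⟨h1, h2⟩
      · left; simp [Prod.ext_iff]; omega
      · right; left; simp [Prod.ext_iff]; omega
      · right; right; left; simp [Prod.ext_iff]; omega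
      · right; right; right; simp [Prod.ext_iff]; omega
    rcases hq with rfl | rfl | rfl | rfl
    · exact Or.inl (Or.inl (Or.inl (by simpa using hp)))
    · exact Or.inl (Or.inl (Or.inr (by simpa using hp)))
    · exact Or.inl (Or.inr (by simpa using hp))
    · exact Or.inr (by simpa using hp)

theorem nodup_pvSweep (grid : List (List Int)) (v : Int) (S : PySem.Set (Int × Int)) :
    (pvSweep grid (pvRows grid) (pvCols grid) v S).Nodup := by
  unfold pvSweep
  exact (nodup_pvAll grid).filter _

theorem pvSatLoop_sound (grid : List (List Int)) (v : Int) (fuel : Nat)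
    (S : PySem.Set (Int × Int)) (T : List (Int × Int)) (hgood : pvGood grid v T)
    (hsub : S ⊆ T) : pvSatLoop grid (pvRows grid) (pvCols grid) v fuel S ⊆ T := by
  induction fuel generalizing S with
  | zero => simpa [pvSatLoop] using hsub
  | succ n ih =>
    rw [pvSatLoop]
    split
    · exact hsub
    · apply ih
      intro x hx
      rw [PySem.Set.mem_union _ _ _] at hx
      rcases hx with hx | hx
      · exact hsub hx
      · obtain ⟨hinb, _, hval, p, hp, hnbr⟩ := (mem_pvSweep grid v S x).1 hx
        exact hgood x hinb hval (Or.inr ⟨p, hsub hp, hnbr⟩)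

theorem pvSatLoop_nodup (grid : List (List Int)) (v : Int) (fuel : Nat)
    (S : PySem.Set (Int × Int)) (hnd : S.Nodup) :
    (pvSatLoop grid (pvRows grid) (pvCols grid) v fuel S).Nodup := by
  induction fuel generalizing S with
  | zero => simpa [pvSatLoop]
  | succ n ih =>
    rw [pvSatLoop]
    split
    · exact hnd
    · exact ih _ (PySem.Set.nodup_union _ _ hnd)

theorem pvSatLoop_inb (grid : List (List Int)) (v : Int) (fuel : Nat)
    (S : PySem.Set (Int × Int)) (hinb : ∀ p ∈ S, pvInb grid p) :
    ∀ p ∈ pvSatLoop grid (pvRows grid) (pvCols grid) v fuel S, pvInb grid p := by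
  induction fuel generalizing S with
  | zero => simpa [pvSatLoop] using hinb
  | succ n ih =>
    rw [pvSatLoop]
    split
    · exact hinb
    · apply ih
      intro p hp
      rw [PySem.Set.mem_union _ _ _] at hp
      rcases hp with hp | hp
      · exact hinb p hp
      · exact ((mem_pvSweep grid v S p).1 hp).1

theorem pvSatLoop_good (grid : List (List Int)) (v : Int) (fuel : Nat)
    (S : PySem.Set (Int × Int)) (hnd : S.Nodup) (hinb : ∀ p ∈ S, pvInb grid p)
    (horig : pvVal grid (0, 0) < v → (0, 0) ∈ S)
    (hfuel : pvN grid + 1 ≤ fuel + S.length) :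
    pvGood grid v (pvSatLoop grid (pvRows grid) (pvCols grid) v fuel S) := by
  induction fuel generalizing S with
  | zero =>
    exfalso
    have := pvLen_le grid S hnd hinb
    omega
  | succ n ih =>
    rw [pvSatLoop]
    split
    · rename_i hT
      intro p hpinb hpval hor
      by_contra hpS
      rcases hor with rfl | ⟨q, hq, hnbr⟩
      · exact hpS (horig hpval)
      · have : p ∈ pvSweep grid (pvRows grid) (pvCols grid) v S :=
          (mem_pvSweep grid v S p).2 ⟨hpinb, hpS, hpval, q, hq, hnbr⟩
        rw [hT] at this
        simp at this
    · rename_i hT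
      have hTsub : ∀ x ∈ pvSweep grid (pvRows grid) (pvCols grid) v S, x ∉ S :=
        fun x hx => ((mem_pvSweep grid v S x).1 hx).2.1
      have hlen : (PySem.Set.union S (pvSweep grid (pvRows grid) (pvCols grid) v S)).length =
          S.length + (pvSweep grid (pvRows grid) (pvCols grid) v S).length := by
        unfold PySem.Set.union
        rw [PySem.Set.update_eq_append_of_disjoint S _ (nodup_pvSweep grid v S) hTsub]
        simp
      have hTpos : 0 < (pvSweep grid (pvRows grid) (pvCols grid) v S).length :=
        List.length_pos_of_ne_nil hT
      apply ih
      · exact PySem.Set.nodup_union _ _ hnd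
      · intro p hp
        rw [PySem.Set.mem_union _ _ _] at hp
        rcases hp with hp | hp
        · exact hinb p hp
        · exact ((mem_pvSweep grid v S p).1 hp).1
      · intro hv
        rw [PySem.Set.mem_union _ _ _]
        exact Or.inl (horig hv)
      · omega
theorem pvOrig_inb (grid : List (List Int)) (hpre : pvPre grid) : pvInb grid ((0, 0) : Int × Int) := by
  obtain ⟨h1, h2⟩ := hpre
  have g1 : 0 < grid.length := List.length_pos_of_ne_nil h1
  have g2 : 0 < (grid.headD []).length := List.length_pos_of_ne_nil h2
  refine ⟨le_refl 0, ?_, le_refl 0, ?_⟩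
  · show (0 : Int) < pvRows grid
    unfold pvRows; exact_mod_cast g1
  · show (0 : Int) < pvCols grid
    unfold pvCols; exact_mod_cast g2

theorem pvGood_pvReach (grid : List (List Int)) (v : Int) (hpre : pvPre grid) :
    pvGood grid v (pvReach grid v) := by
  unfold pvReach
  apply pvSatLoop_good
  · split <;> simp
  · intro p hp
    split at hp <;> simp at hp
    subst hp; exact pvOrig_inb grid hpre
  · intro hv; split <;> simp_all
  · split <;> simp <;> omega

theorem pvReach_least (grid : List (List Int)) (v : Int) (hpre : pvPre grid)
    (T : List (Int × Int)) (hgood : pvGood grid v T) : pvReach grid v ⊆ T := by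
  unfold pvReach
  apply pvSatLoop_sound grid v _ _ T hgood
  intro x hx
  split at hx <;> simp at hx
  rename_i hv
  subst hx
  exact hgood (0, 0) (pvOrig_inb grid hpre) hv (Or.inl rfl)

theorem pvReach_nodup (grid : List (List Int)) (v : Int) : (pvReach grid v).Nodup := by
  unfold pvReach
  apply pvSatLoop_nodup
  split <;> simp

theorem pvReach_inb (grid : List (List Int)) (v : Int) (hpre : pvPre grid) :
    ∀ p ∈ pvReach grid v, pvInb grid p := by
  unfold pvReach
  apply pvSatLoop_inb
  intro p hp
  split at hp <;> simp at hp
  subst hp; exact pvOrig_inb grid hpre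

theorem pvReach_mono (grid : List (List Int)) (u v : Int) (huv : u ≤ v) (hpre : pvPre grid) :
    pvReach grid u ⊆ pvReach grid v := by
  apply pvReach_least grid u hpre
  intro p hinb hval hor
  exact pvGood_pvReach grid v hpre p hinb (lt_of_lt_of_le hval huv) hor

theorem pvReach_nil (grid : List (List Int)) (v : Int) (hpre : pvPre grid)
    (hv : v ≤ pvVal grid (0, 0)) : pvReach grid v = [] := by
  have h : pvReach grid v ⊆ ([] : List (Int × Int)) := by
    apply pvReach_least grid v hpre
    intro p hinb hval hor
    rcases hor with rfl | ⟨q, hq, _⟩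
    · exfalso
      have h1 : pvGridAt grid 0 0 < v := hval
      have h2 : v ≤ pvGridAt grid 0 0 := hv
      omega
    · exact absurd hq (by simp)
  exact List.eq_nil_iff_forall_not_mem.2 fun x hx => by simpa using h hx

-- warm start: saturation from any sound superset of the base reaches exactly pvReach v
theorem pvSatLoop_warm (grid : List (List Int)) (v : Int) (S : PySem.Set (Int × Int))
    (hpre : pvPre grid) (hnd : S.Nodup) (hinb : ∀ p ∈ S, pvInb grid p)
    (horig : pvVal grid (0, 0) < v → (0, 0) ∈ S) (hsub : S ⊆ pvReach grid v) :
    ∀ p, p ∈ pvSatLoop grid (pvRows grid) (pvCols grid) v (pvN grid + 1) S ↔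
      p ∈ pvReach grid v := by
  intro p
  constructor
  · intro hp
    exact pvSatLoop_sound grid v _ S (pvReach grid v) (pvGood_pvReach grid v hpre) hsub hp
  · intro hp
    have hgood : pvGood grid v (pvSatLoop grid (pvRows grid) (pvCols grid) v (pvN grid + 1) S) :=
      pvSatLoop_good grid v _ S hnd hinb horig (by omega)
    exact pvReach_least grid v hpre _ hgood hp

-- B's fold over the sorted distinct values
theorem pvAltFold (grid : List (List Int)) (hpre : pvPre grid) :
    ∀ (vals : List Int) (S : PySem.Set (Int × Int)) (memo : PySem.Dict Int Int),
      vals.Pairwise (· < ·) → S.Nodup → (∀ p ∈ S, pvInb grid p) →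
      (∀ v ∈ vals, S ⊆ pvReach grid v) →
      ∀ x : Int, (vals.foldl (pvAltStep grid (pvRows grid) (pvCols grid)) (S, memo)).2.getD x 0 =
        if x ∈ vals then ((pvReach grid x).length : Int) else memo.getD x 0 := by
  intro vals
  induction vals with
  | nil => intro S memo _ _ _ _ x; simp
  | cons v rest ih =>
    intro S memo hpw hnd hinb hsub x
    rw [List.foldl_cons]
    have hpwr := (List.pairwise_cons.1 hpw).2
    have hvlt := (List.pairwise_cons.1 hpw).1
    -- the new S
    set S' := (pvAltStep grid (pvRows grid) (pvCols grid) (S, memo) v).1 with hS'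
    have hstep : pvAltStep grid (pvRows grid) (pvCols grid) (S, memo) v =
        (S', memo.insert v (S'.length : Int)) := rfl
    have hS'mem : ∀ p, p ∈ S' ↔ p ∈ pvReach grid v := by
      rw [hS']
      unfold pvAltStep
      dsimp only
      split
      · rename_i hv
        intro p
        apply pvSatLoop_warm grid v _ hpre
        · exact PySem.Set.nodup_add _ _ hnd
        · intro q hq
          rw [PySem.Set.mem_add _ _ _] at hq
          rcases hq with hq | rfl
          · exact hinb q hq
          · exact pvOrig_inb grid hpre
        · intro _; rw [PySem.Set.mem_add _ _ _]; exact Or.inr rfl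
        · intro q hq
          rw [PySem.Set.mem_add _ _ _] at hq
          rcases hq with hq | rfl
          · exact hsub v (by simp) hq
          · exact pvGood_pvReach grid v hpre (0, 0) (pvOrig_inb grid hpre) (by exact hv) (Or.inl rfl)
      · rename_i hv
        have hnil : pvReach grid v = [] := pvReach_nil grid v hpre (show v ≤ pvGridAt grid 0 0 by omega)
        have hSnil : S = [] := by
          have h := hsub v (by simp)
          rw [hnil] at h
          exact List.eq_nil_iff_forall_not_mem.2 fun y hy => by simpa using h hy
        rw [hSnil, hnil]
        intro p; rfl
    have hS'nd : S'.Nodup := by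
      rw [hS']
      unfold pvAltStep
      dsimp only
      split
      · exact pvSatLoop_nodup grid v _ _ (PySem.Set.nodup_add _ _ hnd)
      · exact hnd
    have hS'len : (S'.length : Int) = ((pvReach grid v).length : Int) := by
      have hperm := (List.perm_ext_iff_of_nodup hS'nd (pvReach_nodup grid v)).2 hS'mem
      exact_mod_cast hperm.length_eq
    have hS'inb : ∀ p ∈ S', pvInb grid p := fun p hp =>
      pvReach_inb grid v hpre p ((hS'mem p).1 hp)
    rw [hstep]
    rw [ih S' (memo.insert v (S'.length : Int)) hpwr hS'nd hS'inb ?_]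
    · by_cases hx : x ∈ rest
      · simp [hx, List.mem_cons]
      · simp only [hx, if_false]
        rw [PySem.Dict.getD_insert]
        by_cases hxv : x = v
        · subst hxv
          simp [hS'len]
        · simp [hxv, hx, List.mem_cons]
    · intro w hw p hp
      have h1 : p ∈ pvReach grid v := (hS'mem p).1 hp
      exact pvReach_mono grid v w (le_of_lt (hvlt w hw)) hpre h1
theorem pvAlt_eq_map (grid : List (List Int)) (queries : List Int) (hpre : pvPre grid) :
    maxPoints_20250328_alt grid queries =
      queries.map (fun v => ((pvReach grid v).length : Int)) := by
  unfold maxPoints_20250328_alt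
  have h := pvAltFold grid hpre
    (PySem.List.sorted (PySem.Set.ofList queries) (fun x => x) false)
    PySem.Set.empty PySem.Dict.empty
    (PySem.List.sorted_ofList_pairwise_lt queries)
    (by simp [PySem.Set.empty]) (by simp [PySem.Set.empty]) (by simp [PySem.Set.empty])
  unfold pvRows pvCols at h
  refine List.map_congr_left ?_
  intro v hv
  rw [h v]
  have hmem : v ∈ PySem.List.sorted (PySem.Set.ofList queries) (fun x => x) false := by
    rw [PySem.List.mem_sorted]
    exact (PySem.Set.mem_ofList _ _).2 hv
  simp [hmem]

-- ===== visited-matrix lemmas =====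
def pvShape (grid : List (List Int)) (vis : List (List Bool)) : Prop :=
  vis.length = grid.length ∧ ∀ row ∈ vis, row.length = (grid.headD []).length

theorem pvShape_set (grid : List (List Int)) (vis : List (List Bool)) (hsh : pvShape grid vis)
    (r c : Int) (hin : pvInb grid (r, c)) : pvShape grid (pvVisSet vis r c) := by
  obtain ⟨h1, h2⟩ := hsh
  have hr0 : 0 ≤ r := hin.1
  have hr1 : r < pvRows grid := hin.2.1
  have hc0 : 0 ≤ c := hin.2.2.1
  have hc1 : c < pvCols grid := hin.2.2.2
  unfold pvVisSet
  rw [PySem.List.pySetD_of_nonneg _ _ hr0]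
  constructor
  · simpa using h1
  · intro row hrow
    rcases List.mem_or_eq_of_mem_set hrow with h | rfl
    · exact h2 row h
    · rw [PySem.List.pySetD_of_nonneg _ _ hc0]
      have hrlt : r.toNat < vis.length := by
        rw [h1]; unfold pvRows at hr1; omega
      rw [PySem.List.pyGetD_eq_getElem vis [] hr0 (by omega)]
      simpa using h2 _ (List.getElem_mem hrlt)

theorem pvVisAt_set (grid : List (List Int)) (vis : List (List Bool)) (hsh : pvShape grid vis)
    (r c : Int) (hin : pvInb grid (r, c)) (r' c' : Int) (hin' : pvInb grid (r', c')) :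
    pvVisAt (pvVisSet vis r c) r' c' =
      if r' = r ∧ c' = c then true else pvVisAt vis r' c' := by
  obtain ⟨h1, h2⟩ := hsh
  have hr0 : 0 ≤ r := hin.1
  have hr1 : r < pvRows grid := hin.2.1
  have hc0 : 0 ≤ c := hin.2.2.1
  have hc1 : c < pvCols grid := hin.2.2.2
  have hr0' : 0 ≤ r' := hin'.1
  have hr1' : r' < pvRows grid := hin'.2.1
  have hc0' : 0 ≤ c' := hin'.2.2.1
  have hc1' : c' < pvCols grid := hin'.2.2.2
  have hrlt : r.toNat < vis.length := by rw [h1]; unfold pvRows at hr1; omega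
  have hrlt' : r'.toNat < vis.length := by rw [h1]; unfold pvRows at hr1'; omega
  have hclt : c.toNat < vis[r.toNat].length := by
    rw [h2 _ (List.getElem_mem hrlt)]; unfold pvCols at hc1; omega
  have hclt' : c'.toNat < vis[r'.toNat].length := by
    rw [h2 _ (List.getElem_mem hrlt')]; unfold pvCols at hc1'; omega
  unfold pvVisSet pvVisAt
  rw [PySem.List.pySetD_of_nonneg _ _ hr0, PySem.List.pySetD_of_nonneg _ _ hc0,
    PySem.List.pyGetD_eq_getElem vis [] hr0 (by omega)]
  rw [PySem.List.pyGet?_of_nonneg _ hr0', PySem.List.pyGet?_of_nonneg _ hr0']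
  by_cases hre : r' = r
  · subst hre
    rw [List.getElem?_set_self (by omega), List.getElem?_eq_getElem hrlt']
    simp only [Option.bind_some]
    rw [PySem.List.pyGet?_of_nonneg _ hc0', PySem.List.pyGet?_of_nonneg _ hc0']
    by_cases hce : c' = c
    · subst hce
      rw [List.getElem?_set_self (by omega)]
      simp
    · have hcc : c.toNat ≠ c'.toNat := by omega
      rw [List.getElem?_set_ne hcc]
      simp [hce]
  · have hrr : r.toNat ≠ r'.toNat := by omega
    rw [List.getElem?_set_ne hrr]
    simp [hre]

theorem pvVisAt_init (grid : List (List Int)) (hpre : pvPre grid) (r' c' : Int)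
    (hin' : pvInb grid (r', c')) :
    pvVisAt (pvVisSet (List.replicate grid.length
      (List.replicate (grid.headD []).length false)) 0 0) r' c' = ((r' = 0 ∧ c' = 0) : Prop) := by
  have hsh : pvShape grid (List.replicate grid.length
      (List.replicate (grid.headD []).length false)) := by
    constructor
    · simp
    · intro row hrow
      rw [List.eq_of_mem_replicate hrow]
      simp
  rw [pvVisAt_set grid _ hsh 0 0 (pvOrig_inb grid hpre) r' c' hin']
  have hr0' : 0 ≤ r' := hin'.1
  have hr1' : r' < pvRows grid := hin'.2.1
  have hc0' : 0 ≤ c' := hin'.2.2.1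
  have hc1' : c' < pvCols grid := hin'.2.2.2
  have hrlt' : r'.toNat < grid.length := by unfold pvRows at hr1'; omega
  have hclt' : c'.toNat < (grid.headD []).length := by unfold pvCols at hc1'; omega
  by_cases h : r' = 0 ∧ c' = 0
  · simp [h]
  · simp only [if_neg h]
    unfold pvVisAt
    rw [PySem.List.pyGet?_of_nonneg _ hr0']
    rw [List.getElem?_replicate (i := r'.toNat)]
    rw [if_pos hrlt']
    simp only [Option.bind_some]
    rw [PySem.List.pyGet?_of_nonneg _ hc0']
    rw [List.getElem?_replicate (i := c'.toNat)]
    rw [if_pos hclt']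
    simp [h]
def pvVisEq (grid : List (List Int)) (vis : List (List Bool)) (L : List (Int × Int)) : Prop :=
  pvShape grid vis ∧ ∀ p, pvInb grid p → (pvVisAt vis p.1 p.2 = true ↔ p ∈ L)

theorem pvVisEq_congr (grid : List (List Int)) (vis : List (List Bool))
    (L L' : List (Int × Int)) (h : pvVisEq grid vis L) (hmem : ∀ p, p ∈ L ↔ p ∈ L') :
    pvVisEq grid vis L' :=
  ⟨h.1, fun p hp => (h.2 p hp).trans (hmem p)⟩

theorem pvDirStep_spec (grid : List (List Int)) (vis : List (List Bool))
    (L ns : List (Int × Int)) (r c : Int) (d : Int × Int)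
    (hL : pvVisEq grid vis L) (hinb : ∀ p ∈ L, pvInb grid p) :
    ∃ app vis',
      pvDirStep (pvRows grid) (pvCols grid) r c (ns, vis) d = (ns ++ app, vis') ∧
      pvVisEq grid vis' (L ++ app) ∧
      (∀ q ∈ app, q = (r + d.1, c + d.2) ∧ pvInb grid q ∧ q ∉ L) ∧
      ((r + d.1, c + d.2) ∈ L ++ app ∨ ¬ pvInb grid (r + d.1, c + d.2)) ∧
      (∀ p ∈ L ++ app, pvInb grid p) ∧ (app = [] ∨ app = [(r + d.1, c + d.2)]) := by
  set q : Int × Int := (r + d.1, c + d.2) with hq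
  have hq1 : q.1 = r + d.1 := by rw [hq]
  have hq2 : q.2 = c + d.2 := by rw [hq]
  unfold pvDirStep
  dsimp only
  by_cases hcond : r + d.1 < 0 ∨ pvRows grid ≤ r + d.1 ∨ c + d.2 < 0 ∨
      pvCols grid ≤ c + d.2 ∨ pvVisAt vis (r + d.1) (c + d.2) = true
  · refine ⟨[], vis, ?_, ?_, by simp, ?_, by simpa using hinb, Or.inl rfl⟩
    · rw [if_pos hcond]; simp
    · simpa using hL
    · rcases hcond with h | h | h | h | h
      · right; intro hi; exact absurd hi.1 (by omega)
      · right; intro hi; exact absurd hi.2.1 (by omega)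
      · right; intro hi; exact absurd hi.2.2.1 (by omega)
      · right; intro hi; exact absurd hi.2.2.2 (by omega)
      · by_cases hik : pvInb grid q
        · left
          rw [List.mem_append]
          exact Or.inl ((hL.2 q hik).1 h)
        · right; exact hik
  · push_neg at hcond
    obtain ⟨h1, h2, h3, h4, h5⟩ := hcond
    have hik : pvInb grid q := ⟨by omega, by omega, by omega, by omega⟩
    have hnotL : q ∉ L := fun hmem => h5 ((hL.2 q hik).2 hmem)
    refine ⟨[q], pvVisSet vis q.1 q.2, ?_, ?_, ?_, ?_, ?_, Or.inr rfl⟩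
    · rw [if_neg (by push_neg; refine ⟨h1, h2, h3, h4, ?_⟩; simp_all)]
    · refine ⟨pvShape_set grid vis hL.1 q.1 q.2 hik, ?_⟩
      intro p hp
      rw [pvVisAt_set grid vis hL.1 q.1 q.2 hik p.1 p.2 hp]
      by_cases hpq : p = q
      · subst hpq; simp
      · have : ¬ (p.1 = q.1 ∧ p.2 = q.2) := fun hc => hpq (Prod.ext hc.1 hc.2)
        rw [if_neg this]
        rw [hL.2 p hp]
        simp [hpq]
    · intro x hx; simp at hx; subst hx; exact ⟨rfl, hik, hnotL⟩
    · left; simp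
    · intro p hp
      rcases List.mem_append.1 hp with h | h
      · exact hinb p h
      · simp at h; subst h; exact hik

theorem pvDirFold_spec (grid : List (List Int)) (vis : List (List Bool))
    (L ns : List (Int × Int)) (r c : Int)
    (hL : pvVisEq grid vis L) (hinb : ∀ p ∈ L, pvInb grid p) :
    ∃ new vis',
      pvDirections.foldl (pvDirStep (pvRows grid) (pvCols grid) r c) (ns, vis) =
        (ns ++ new, vis') ∧
      pvVisEq grid vis' (L ++ new) ∧ new.Nodup ∧
      (∀ q ∈ new, pvInb grid q ∧ pvNbr (r, c) q ∧ q ∉ L) ∧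
      (∀ q, pvNbr (r, c) q → pvInb grid q → q ∈ L ++ new) ∧
      (∀ p ∈ L ++ new, pvInb grid p) := by
  have step := pvDirStep_spec grid vis L ns r c (0, 1) hL hinb
  obtain ⟨a1, v1, he1, hv1, ha1, hc1, hi1, hs1⟩ := step
  obtain ⟨a2, v2, he2, hv2, ha2, hc2, hi2, hs2⟩ :=
    pvDirStep_spec grid v1 (L ++ a1) (ns ++ a1) r c (0, -1) hv1 hi1
  obtain ⟨a3, v3, he3, hv3, ha3, hc3, hi3, hs3⟩ :=
    pvDirStep_spec grid v2 (L ++ a1 ++ a2) (ns ++ a1 ++ a2) r c (1, 0) hv2 hi2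
  obtain ⟨a4, v4, he4, hv4, ha4, hc4, hi4, hs4⟩ :=
    pvDirStep_spec grid v3 (L ++ a1 ++ a2 ++ a3) (ns ++ a1 ++ a2 ++ a3) r c (-1, 0) hv3 hi3
  refine ⟨a1 ++ a2 ++ a3 ++ a4, v4, ?_, ?_, ?_, ?_, ?_, ?_⟩
  · unfold pvDirections
    rw [List.foldl_cons, he1, List.foldl_cons, he2, List.foldl_cons, he3, List.foldl_cons, he4,
      List.foldl_nil]
    simp [List.append_assoc]
  · apply pvVisEq_congr grid v4 _ _ hv4
    intro p; simp [List.append_assoc]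
  · -- nodup: each aᵢ is [] or a singleton, and each avoids L ++ (earlier pieces)
    have n1 : a1.Nodup := by rcases hs1 with rfl | rfl <;> simp
    have n2 : a2.Nodup := by rcases hs2 with rfl | rfl <;> simp
    have n3 : a3.Nodup := by rcases hs3 with rfl | rfl <;> simp
    have n4 : a4.Nodup := by rcases hs4 with rfl | rfl <;> simp
    have d12 : a1.Disjoint a2 := fun x hx1 hx2 =>
      (ha2 x hx2).2.2 (List.mem_append.2 (Or.inr hx1))
    have n12 : (a1 ++ a2).Nodup := List.nodup_append.2 ⟨n1, n2, fun a ha b hb heq => d12 ha (heq ▸ hb)⟩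
    have d123 : (a1 ++ a2).Disjoint a3 := fun x hx1 hx2 =>
      (ha3 x hx2).2.2 (by
        rcases List.mem_append.1 hx1 with h | h
        · exact List.mem_append.2 (Or.inl (List.mem_append.2 (Or.inr h)))
        · exact List.mem_append.2 (Or.inr h))
    have n123 : (a1 ++ a2 ++ a3).Nodup := List.nodup_append.2 ⟨n12, n3, fun a ha b hb heq => d123 ha (heq ▸ hb)⟩
    have d1234 : (a1 ++ a2 ++ a3).Disjoint a4 := fun x hx1 hx2 =>
      (ha4 x hx2).2.2 (by
        rcases List.mem_append.1 hx1 with h | h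
        · rcases List.mem_append.1 h with h' | h'
          · exact List.mem_append.2 (Or.inl (List.mem_append.2 (Or.inl (List.mem_append.2 (Or.inr h')))))
          · exact List.mem_append.2 (Or.inl (List.mem_append.2 (Or.inr h')))
        · exact List.mem_append.2 (Or.inr h))
    exact List.nodup_append.2 ⟨n123, n4, fun a ha b hb heq => d1234 ha (heq ▸ hb)⟩
  · intro q hq
    simp only [List.append_assoc, List.mem_append] at hq
    rcases hq with h | h | h | h
    · obtain ⟨hq, hik, hnl⟩ := ha1 q h
      subst hq
      exact ⟨hik, by unfold pvNbr; dsimp; omega, hnl⟩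
    · obtain ⟨hq, hik, hnl⟩ := ha2 q h
      subst hq
      exact ⟨hik, by unfold pvNbr; dsimp; omega, fun hc => hnl (List.mem_append.2 (Or.inl hc))⟩
    · obtain ⟨hq, hik, hnl⟩ := ha3 q h
      subst hq
      exact ⟨hik, by unfold pvNbr; dsimp; omega,
        fun hc => hnl (List.mem_append.2 (Or.inl (List.mem_append.2 (Or.inl hc))))⟩
    · obtain ⟨hq, hik, hnl⟩ := ha4 q h
      subst hq
      exact ⟨hik, by unfold pvNbr; dsimp; omega,
        fun hc => hnl (List.mem_append.2 (Or.inl (List.mem_append.2 (Or.inl (List.mem_append.2 (Or.inl hc))))))⟩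
  · intro q hnbr hik
    have emb : ∀ x, x ∈ L → x ∈ L ++ (a1 ++ a2 ++ a3 ++ a4) := fun x hx =>
      List.mem_append.2 (Or.inl hx)
    have emb1 : ∀ x, x ∈ L ++ a1 → x ∈ L ++ (a1 ++ a2 ++ a3 ++ a4) := by
      intro x hx
      rcases List.mem_append.1 hx with h | h
      · exact emb x h
      · exact List.mem_append.2 (Or.inr (List.mem_append.2 (Or.inl (List.mem_append.2 (Or.inl
          (List.mem_append.2 (Or.inl h)))))))
    have emb2 : ∀ x, x ∈ L ++ a1 ++ a2 → x ∈ L ++ (a1 ++ a2 ++ a3 ++ a4) := by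
      intro x hx
      rcases List.mem_append.1 hx with h | h
      · exact emb1 x h
      · exact List.mem_append.2 (Or.inr (List.mem_append.2 (Or.inl (List.mem_append.2 (Or.inl
          (List.mem_append.2 (Or.inr h)))))))
    have emb3 : ∀ x, x ∈ L ++ a1 ++ a2 ++ a3 → x ∈ L ++ (a1 ++ a2 ++ a3 ++ a4) := by
      intro x hx
      rcases List.mem_append.1 hx with h | h
      · exact emb2 x h
      · exact List.mem_append.2 (Or.inr (List.mem_append.2 (Or.inl (List.mem_append.2 (Or.inr h)))))
    have emb4 : ∀ x, x ∈ L ++ a1 ++ a2 ++ a3 ++ a4 → x ∈ L ++ (a1 ++ a2 ++ a3 ++ a4) := by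
      intro x hx
      rcases List.mem_append.1 hx with h | h
      · exact emb3 x h
      · exact List.mem_append.2 (Or.inr (List.mem_append.2 (Or.inr h)))
    have hq4 : q = (r + ((0 : Int), (1 : Int)).1, c + ((0 : Int), (1 : Int)).2) ∨
        q = (r + ((0 : Int), (-1 : Int)).1, c + ((0 : Int), (-1 : Int)).2) ∨
        q = (r + ((1 : Int), (0 : Int)).1, c + ((1 : Int), (0 : Int)).2) ∨
        q = (r + ((-1 : Int), (0 : Int)).1, c + ((-1 : Int), (0 : Int)).2) := by
      rcases q with ⟨x, y⟩
      unfold pvNbr at hnbr; dsimp at hnbr ⊢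
      rcases hnbr with ⟨hx, hy⟩ | ⟨hx, hy⟩ | ⟨hx, hy⟩ | ⟨hx, hy⟩
      · right; right; left; simp only [Prod.mk.injEq]; omega
      · right; right; right; simp only [Prod.mk.injEq]; omega
      · left; simp only [Prod.mk.injEq]; omega
      · right; left; simp only [Prod.mk.injEq]; omega
    rcases hq4 with rfl | rfl | rfl | rfl
    · rcases hc1 with h | h
      · exact emb1 _ h
      · exact absurd hik h
    · rcases hc2 with h | h
      · exact emb2 _ h
      · exact absurd hik h
    · rcases hc3 with h | h
      · exact emb3 _ h
      · exact absurd hik h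
    · rcases hc4 with h | h
      · exact emb4 _ h
      · exact absurd hik h
  · intro p hp
    apply hi4
    simpa [List.append_assoc] using hp
def pvFrontierIsh (C : List (Int × Int)) (p : Int × Int) : Prop :=
  p = (0, 0) ∨ ∃ q ∈ C, pvNbr q p

def pvWInv (grid : List (List Int)) (v : Int) (C left : List (Int × Int)) (cur : Int)
    (ns : List (Int × Int)) (vis : List (List Bool)) (rem : List (Int × Int)) : Prop :=
  cur = (C.length : Int) ∧
  (C ++ left ++ ns ++ rem).Nodup ∧
  pvVisEq grid vis (C ++ left ++ ns ++ rem) ∧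
  (∀ p ∈ C, p ∈ pvReach grid v) ∧
  (∀ p ∈ left, pvInb grid p ∧ v ≤ pvVal grid p ∧ pvFrontierIsh C p) ∧
  (∀ p ∈ ns ++ rem, pvInb grid p ∧ pvFrontierIsh C p) ∧
  (∀ p ∈ C, ∀ q, pvNbr p q → pvInb grid q → q ∈ C ++ left ++ ns ++ rem) ∧
  (0, 0) ∈ C ++ left ++ ns ++ rem

theorem pvPermCount {α : Type} [DecidableEq α] (xs ys : List α)
    (h : ∀ x, xs.count x = ys.count x) : xs.Perm ys := List.perm_iff_count.2 h

theorem pvWInv_inb (grid : List (List Int)) (v : Int) (hpre : pvPre grid)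
    (C left : List (Int × Int)) (cur : Int) (ns : List (Int × Int)) (vis : List (List Bool))
    (rem : List (Int × Int)) (h : pvWInv grid v C left cur ns vis rem) :
    ∀ p ∈ C ++ left ++ ns ++ rem, pvInb grid p := by
  obtain ⟨-, -, -, hC, hleft, hnr, -, -⟩ := h
  intro p hp
  simp only [List.append_assoc, List.mem_append] at hp
  rcases hp with h | h | h
  · exact pvReach_inb grid v hpre p (hC p h)
  · exact (hleft p h).1
  · exact (hnr p (List.mem_append.2 h)).1

theorem pvCellFold (grid : List (List Int)) (v : Int) (hpre : pvPre grid) :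
    ∀ (rem C left : List (Int × Int)) (cur : Int) (ns : List (Int × Int))
      (vis : List (List Bool)), pvWInv grid v C left cur ns vis rem →
      ∃ C' left' cur' ns' vis',
        rem.foldl (pvCellStep grid (pvRows grid) (pvCols grid) v) (left, cur, ns, vis) =
          (left', cur', ns', vis') ∧
        pvWInv grid v C' left' cur' ns' vis' [] ∧
        C'.length + left'.length = C.length + left.length + rem.length ∧
        ns.length ≤ ns'.length := by
  intro rem
  induction rem with
  | nil =>
    intro C left cur ns vis hinv
    exact ⟨C, left, cur, ns, vis, rfl, hinv, by simp, le_refl _⟩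
  | cons p t ih =>
    intro C left cur ns vis hinv
    obtain ⟨hcur, hnd, hviseq, hC, hleft, hnr, hcomp, horig⟩ := hinv
    rw [List.foldl_cons]
    by_cases hval : v ≤ pvGridAt grid p.1 p.2
    · -- p stays unvisited-for-this-v: moved to left
      have hstep : pvCellStep grid (pvRows grid) (pvCols grid) v (left, cur, ns, vis) p =
          (left ++ [p], cur, ns, vis) := by
        unfold pvCellStep
        rw [if_pos hval]
      rw [hstep]
      have hperm : (C ++ (left ++ [p]) ++ ns ++ t).Perm (C ++ left ++ ns ++ (p :: t)) := by
        apply pvPermCount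
        intro x
        simp only [List.count_append, List.count_cons, List.count_nil]
        split_ifs <;> omega
      have hpinfo := hnr p (List.mem_append.2 (Or.inr (List.mem_cons_self)))
      have hinv2 : pvWInv grid v C (left ++ [p]) cur ns vis t := by
        refine ⟨hcur, hperm.symm.nodup hnd, ?_, hC, ?_, ?_, ?_, ?_⟩
        · exact pvVisEq_congr grid vis _ _ hviseq (fun x => hperm.symm.mem_iff)
        · intro q hq
          rcases List.mem_append.1 hq with h | h
          · exact hleft q h
          · simp only [List.mem_singleton] at h
            subst h
            exact ⟨hpinfo.1, hval, hpinfo.2⟩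
        · intro q hq
          exact hnr q (by
            rcases List.mem_append.1 hq with h | h
            · exact List.mem_append.2 (Or.inl h)
            · exact List.mem_append.2 (Or.inr (List.mem_cons_of_mem _ h)))
        · intro q hq s hnbr hik
          have := hcomp q hq s hnbr hik
          exact (hperm.mem_iff).2 this
        · exact (hperm.mem_iff).2 horig
      obtain ⟨C', left', cur', ns', vis', heq, hinv', hlen, hns⟩ :=
        ih C (left ++ [p]) cur ns vis hinv2
      exact ⟨C', left', cur', ns', vis', heq, hinv', by simp at hlen ⊢; omega, hns⟩
    · -- p is counted; its unvisited in-bounds neighbours are pushed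
      push_neg at hval
      have hpinfo := hnr p (List.mem_append.2 (Or.inr (List.mem_cons_self)))
      have hdir := pvDirFold_spec grid vis (C ++ left ++ ns ++ (p :: t)) ns p.1 p.2 hviseq
        (pvWInv_inb grid v hpre C left cur ns vis (p :: t)
          ⟨hcur, hnd, hviseq, hC, hleft, hnr, hcomp, horig⟩)
      obtain ⟨new, vis2, hfold, hviseq2, hndnew, hnew, hcompnew, hinb2⟩ := hdir
      have hstep : pvCellStep grid (pvRows grid) (pvCols grid) v (left, cur, ns, vis) p =
          (left, cur + 1, ns ++ new, vis2) := by
        unfold pvCellStep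
        rw [if_neg (by omega)]
        dsimp only
        rw [hfold]
      rw [hstep]
      -- p is reachable
      have hpReach : p ∈ pvReach grid v := by
        apply pvGood_pvReach grid v hpre p hpinfo.1 hval
        rcases hpinfo.2 with h | ⟨q, hq, hnbr⟩
        · exact Or.inl h
        · exact Or.inr ⟨q, hC q hq, hnbr⟩
      have hperm : ((C ++ [p]) ++ left ++ (ns ++ new) ++ t).Perm
          ((C ++ left ++ ns ++ (p :: t)) ++ new) := by
        apply pvPermCount
        intro x
        simp only [List.count_append, List.count_cons, List.count_nil]
        split_ifs <;> omega
      have hndnew2 : ((C ++ left ++ ns ++ (p :: t)) ++ new).Nodup := by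
        rw [List.nodup_append]
        exact ⟨hnd, hndnew, fun a ha b hb heq => (hnew b hb).2.2 (heq ▸ ha)⟩
      have hinv2 : pvWInv grid v (C ++ [p]) left (cur + 1) (ns ++ new) vis2 t := by
        refine ⟨?_, hperm.symm.nodup hndnew2, ?_, ?_, ?_, ?_, ?_, ?_⟩
        · rw [hcur]; push_cast; simp
        · exact pvVisEq_congr grid vis2 _ _ hviseq2 (fun x => hperm.symm.mem_iff)
        · intro q hq
          rcases List.mem_append.1 hq with h | h
          · exact hC q h
          · simp only [List.mem_singleton] at h
            subst h
            exact hpReach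
        · intro q hq
          obtain ⟨h1, h2, h3⟩ := hleft q hq
          refine ⟨h1, h2, ?_⟩
          rcases h3 with h | ⟨s, hs, hnbr⟩
          · exact Or.inl h
          · exact Or.inr ⟨s, List.mem_append.2 (Or.inl hs), hnbr⟩
        · intro q hq
          rcases List.mem_append.1 hq with h | h
          · rcases List.mem_append.1 h with h' | h'
            · obtain ⟨h1, h2⟩ := hnr q (List.mem_append.2 (Or.inl h'))
              refine ⟨h1, ?_⟩
              rcases h2 with h | ⟨s, hs, hnbr⟩
              · exact Or.inl h
              · exact Or.inr ⟨s, List.mem_append.2 (Or.inl hs), hnbr⟩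
            · obtain ⟨h1, h2, h3⟩ := hnew q h'
              refine ⟨h1, Or.inr ⟨p, List.mem_append.2 (Or.inr (List.mem_singleton.2 rfl)), ?_⟩⟩
              have : (p.1, p.2) = p := rfl
              rw [← this]
              exact h2
          · obtain ⟨h1, h2⟩ := hnr q (List.mem_append.2 (Or.inr (List.mem_cons_of_mem _ h)))
            refine ⟨h1, ?_⟩
            rcases h2 with h | ⟨s, hs, hnbr⟩
            · exact Or.inl h
            · exact Or.inr ⟨s, List.mem_append.2 (Or.inl hs), hnbr⟩
        · intro q hq s hnbr hik
          rcases List.mem_append.1 hq with h | h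
          · have := hcomp q h s hnbr hik
            exact (hperm.mem_iff).2 (List.mem_append.2 (Or.inl this))
          · simp only [List.mem_singleton] at h
            subst h
            have : (q.1, q.2) = q := rfl
            have hc := hcompnew s (by rw [this]; exact hnbr) hik
            exact (hperm.mem_iff).2 (by
              rcases List.mem_append.1 hc with h | h
              · exact List.mem_append.2 (Or.inl h)
              · exact List.mem_append.2 (Or.inr h))
        · exact (hperm.mem_iff).2 (List.mem_append.2 (Or.inl horig))
      obtain ⟨C', left', cur', ns', vis', heq, hinv', hlen, hns⟩ :=
        ih (C ++ [p]) left (cur + 1) (ns ++ new) vis2 hinv2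
      refine ⟨C', left', cur', ns', vis', heq, hinv', by simp at hlen ⊢; omega, ?_⟩
      calc ns.length ≤ (ns ++ new).length := by simp
        _ ≤ ns'.length := hns
theorem pvWInv_swap (grid : List (List Int)) (v : Int) (C left : List (Int × Int)) (cur : Int)
    (ns : List (Int × Int)) (vis : List (List Bool))
    (h : pvWInv grid v C left cur ns vis []) : pvWInv grid v C left cur [] vis ns := by
  obtain ⟨hcur, hnd, hviseq, hC, hleft, hnr, hcomp, horig⟩ := h
  have hmem : ∀ x : Int × Int, x ∈ C ++ left ++ ns ++ [] ↔ x ∈ C ++ left ++ [] ++ ns := by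
    intro x; simp
  refine ⟨hcur, ?_, pvVisEq_congr grid vis _ _ hviseq hmem, hC, hleft, ?_, ?_, ?_⟩
  · simpa using hnd
  · intro p hp; exact hnr p (by simpa using hp)
  · intro p hp q h1 h2; exact (hmem q).1 (hcomp p hp q h1 h2)
  · exact (hmem _).1 horig

theorem pvWInv_leftToRem (grid : List (List Int)) (v : Int) (C left : List (Int × Int))
    (cur : Int) (vis : List (List Bool))
    (h : pvWInv grid v C left cur [] vis []) : pvWInv grid v C [] cur [] vis left := by
  obtain ⟨hcur, hnd, hviseq, hC, hleft, hnr, hcomp, horig⟩ := h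
  have hmem : ∀ x : Int × Int, x ∈ C ++ left ++ [] ++ [] ↔ x ∈ C ++ [] ++ [] ++ left := by
    intro x; simp
  refine ⟨hcur, ?_, pvVisEq_congr grid vis _ _ hviseq hmem, hC, by simp, ?_, ?_, ?_⟩
  · simpa using hnd
  · intro p hp
    simp only [List.nil_append] at hp
    exact ⟨(hleft p hp).1, (hleft p hp).2.2⟩
  · intro p hp q h1 h2; exact (hmem q).1 (hcomp p hp q h1 h2)
  · exact (hmem _).1 horig

theorem pvWaveLoop_spec (grid : List (List Int)) (v : Int) (hpre : pvPre grid) :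
    ∀ (fuel : Nat) (C left : List (Int × Int)) (cur : Int) (stack : List (Int × Int))
      (vis : List (List Bool)),
      pvWInv grid v C left cur [] vis stack →
      pvN grid + 1 ≤ fuel + (C.length + left.length + stack.length) →
      ∃ C' left' cur' vis',
        pvWaveLoop grid (pvRows grid) (pvCols grid) v fuel (left, cur, stack, vis) =
          (left', cur', vis') ∧
        pvWInv grid v C' [] cur' [] vis' left' ∧
        (∀ p, p ∈ C' ↔ p ∈ pvReach grid v) ∧
        cur' = ((pvReach grid v).length : Int) := by
  intro fuel
  induction fuel with
  | zero =>
    intro C left cur stack vis hinv hfuel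
    exfalso
    have hlen := pvLen_le grid (C ++ left ++ [] ++ stack) hinv.2.1
      (pvWInv_inb grid v hpre C left cur [] vis stack hinv)
    simp at hlen
    omega
  | succ n ih =>
    intro C left cur stack vis hinv hfuel
    obtain ⟨C1, left1, cur1, ns1, vis1, heq, hinv1, hlen1, -⟩ :=
      pvCellFold grid v hpre stack C left cur [] vis hinv
    rw [pvWaveLoop]
    dsimp only
    rw [heq]
    dsimp only
    by_cases hns : ns1 = []
    · rw [if_pos hns]
      subst hns
      obtain ⟨hcur, hnd, hviseq, hC, hleft, hnr, hcomp, horig⟩ := hinv1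
      have hnd' : (C1 ++ left1).Nodup := by simpa using hnd
      have hndC : C1.Nodup := (List.nodup_append.1 hnd').1
      have hCmem : ∀ p, p ∈ C1 ↔ p ∈ pvReach grid v := by
        intro p
        constructor
        · exact hC p
        · intro hp
          refine pvReach_least grid v hpre C1 ?_ hp
          intro q hinb hval hor
          rcases hor with rfl | ⟨s, hs, hnbr⟩
          · have h0 : (0, 0) ∈ C1 ++ left1 := by simpa using horig
            rcases List.mem_append.1 h0 with h | h
            · exact h
            · exact absurd hval (by have := (hleft _ h).2.1; omega)
          · have h0 : q ∈ C1 ++ left1 := by simpa using hcomp s hs q hnbr hinb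
            rcases List.mem_append.1 h0 with h | h
            · exact h
            · exact absurd hval (by have := (hleft _ h).2.1; omega)
      have hcurR : cur1 = ((pvReach grid v).length : Int) := by
        rw [hcur]
        have hperm := (List.perm_ext_iff_of_nodup hndC (pvReach_nodup grid v)).2 hCmem
        exact_mod_cast congrArg (fun n : Nat => (n : Int)) hperm.length_eq
      exact ⟨C1, left1, cur1, vis1, rfl,
        pvWInv_leftToRem grid v C1 left1 cur1 vis1
          ⟨hcur, hnd, hviseq, hC, hleft, hnr, hcomp, horig⟩, hCmem, hcurR⟩
    · rw [if_neg hns]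
      have hstep := pvWInv_swap grid v C1 left1 cur1 ns1 vis1 hinv1
      have hfuel' : pvN grid + 1 ≤ n + (C1.length + left1.length + ns1.length) := by
        have hpos : 0 < ns1.length := List.length_pos_of_ne_nil hns
        omega
      exact ih C1 left1 cur1 ns1 vis1 hstep hfuel'
theorem pvQueFold (grid : List (List Int)) (hpre : pvPre grid) :
    ∀ (que : List (Int × Int)) (C stack : List (Int × Int)) (cur : Int)
      (vis : List (List Bool)) (memo : PySem.Dict Int Int) (res : List Int),
      que.Pairwise (fun a b => a.1 ≤ b.1) →
      (∀ x ∈ que, ∀ p ∈ C, p ∈ pvReach grid x.1) →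
      (∀ x m, memo.get? x = some m → m = ((pvReach grid x).length : Int)) →
      (∀ v : Int, (∀ p ∈ C, p ∈ pvReach grid v) → pvWInv grid v C [] cur [] vis stack) →
      (que.foldl (pvQueryStep grid (pvRows grid) (pvCols grid))
        (cur, stack, vis, memo, res)).2.2.2.2 =
        que.foldl (fun r x => PySem.List.pySetD r x.2 ((pvReach grid x.1).length : Int)) res := by
  intro que
  induction que with
  | nil => intro C stack cur vis memo res _ _ _ _; rfl
  | cons x t ih =>
    intro C stack cur vis memo res hpw hCs hmemo hcore
    rw [List.foldl_cons, List.foldl_cons]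
    have hpwt := (List.pairwise_cons.1 hpw).2
    have hxle := (List.pairwise_cons.1 hpw).1
    rcases hget : memo.get? x.1 with - | m
    · -- memo miss: run the wave loop
      have hinv : pvWInv grid x.1 C [] cur [] vis stack :=
        hcore x.1 (hCs x List.mem_cons_self)
      obtain ⟨C', left', cur', vis', heqw, hinv', hC'mem, hcur'⟩ :=
        pvWaveLoop_spec grid x.1 hpre (pvN grid + 1) C [] cur stack vis hinv (by omega)
      have hstep : pvQueryStep grid (pvRows grid) (pvCols grid)
          (cur, stack, vis, memo, res) x =
          (cur', left', vis', memo.insert x.1 cur', PySem.List.pySetD res x.2 cur') := by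
        unfold pvQueryStep
        dsimp only
        rw [hget]
        dsimp only
        have hfuel : grid.length * (grid.headD []).length + 1 = pvN grid + 1 := rfl
        rw [hfuel, heqw]
      rw [hstep]
      rw [ih C' left' cur' vis' (memo.insert x.1 cur') (PySem.List.pySetD res x.2 cur') hpwt ?_ ?_ ?_]
      · rw [hcur']
      · intro y hy p hp
        exact pvReach_mono grid x.1 y.1 (hxle y hy) hpre ((hC'mem p).1 hp)
      · intro y m hm
        rw [PySem.Dict.get?_insert] at hm
        split at hm
        · rename_i hyx
          subst hyx
          rw [← Option.some_inj.1 hm, hcur']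
        · exact hmemo y m hm
      · intro w hCw
        obtain ⟨hcur2, hnd2, hviseq2, hC2, hleft2, hnr2, hcomp2, horig2⟩ := hinv'
        exact ⟨hcur2, hnd2, hviseq2, hCw, fun p hp => absurd hp (by simp), hnr2, hcomp2, horig2⟩
    · -- memo hit
      have hstep : pvQueryStep grid (pvRows grid) (pvCols grid)
          (cur, stack, vis, memo, res) x =
          (cur, stack, vis, memo, PySem.List.pySetD res x.2 m) := by
        unfold pvQueryStep
        dsimp only
        rw [hget]
      rw [hstep]
      rw [ih C stack cur vis memo (PySem.List.pySetD res x.2 m) hpwt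
        (fun y hy => hCs y (List.mem_cons_of_mem _ hy)) hmemo hcore]
      rw [hmemo x.1 m hget]
theorem pvScatter (queries : List Int) (f : Int → Int) :
    ∀ (l : List (Int × Int)) (res : List Int),
      res.length = queries.length →
      (∀ x ∈ l, 0 ≤ x.2 ∧ x.2.toNat < queries.length ∧ x.1 = queries[x.2.toNat]?.getD 0) →
      (∀ j, j < queries.length → ((j : Int) ∈ l.map Prod.snd) ∨ res[j]? = (queries.map f)[j]?) →
      l.foldl (fun r x => PySem.List.pySetD r x.2 (f x.1)) res = queries.map f := by
  intro l
  induction l with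
  | nil =>
    intro res hlen hel h3
    rw [List.foldl_nil]
    apply List.ext_getElem?
    intro j
    by_cases hj : j < queries.length
    · rcases h3 j hj with h | h
      · simp at h
      · simpa using h
    · rw [List.getElem?_eq_none (by omega), List.getElem?_eq_none (by simp; omega)]
  | cons x t ih =>
    intro res hlen hel h3
    rw [List.foldl_cons]
    obtain ⟨hx0, hxlt, hxval⟩ := hel x List.mem_cons_self
    rw [PySem.List.pySetD_of_nonneg _ _ hx0]
    apply ih
    · simpa using hlen
    · exact fun y hy => hel y (List.mem_cons_of_mem _ hy)
    · intro j hj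
      by_cases hje : j = x.2.toNat
      · subst hje
        right
        rw [List.getElem?_set_self (by omega)]
        rw [List.getElem?_map, List.getElem?_eq_getElem hj]
        simp only [Option.map_some]
        rw [hxval, List.getElem?_eq_getElem hj]
        rfl
      · rcases h3 j hj with h | h
        · simp only [List.map_cons, List.mem_cons] at h
          rcases h with h | h
          · exfalso; apply hje; omega
          · exact Or.inl h
        · right
          rw [List.getElem?_set_ne (by omega)]
          exact h

theorem pvA_eq_map (grid : List (List Int)) (queries : List Int) (hpre : pvPre grid) :
    maxPoints_20250328 grid queries =
      queries.map (fun v => ((pvReach grid v).length : Int)) := by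
  unfold maxPoints_20250328
  dsimp only
  have h1 := pvQueFold grid hpre
    (PySem.List.sorted ((PySem.List.pyRange 0 (queries.length : Int) 1).map
      (fun i => (PySem.List.pyGetD queries i 0, i))) (fun x => x.1) false)
    [] [(0, 0)] 0
    (pvVisSet (List.replicate grid.length
      (List.replicate (grid.headD []).length false)) 0 0)
    PySem.Dict.empty (List.replicate queries.length 0)
    (PySem.List.sorted_pairwise _ _)
    (by intro x _ p hp; simp at hp)
    (by intro x m hm; simp [PySem.Dict.get?_empty] at hm)
    ?_
  · unfold pvRows pvCols at h1
    rw [h1]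
    apply pvScatter queries (fun v => ((pvReach grid v).length : Int))
    · simp
    · intro x hx
      rw [PySem.List.mem_sorted] at hx
      simp only [List.mem_map] at hx
      obtain ⟨i, hi, rfl⟩ := hx
      rw [PySem.List.mem_pyRange_one] at hi
      dsimp only
      have hilt : i < (queries.length : Int) := hi.2
      refine ⟨hi.1, by omega, ?_⟩
      rw [PySem.List.pyGetD_eq_getElem queries 0 hi.1 (by exact_mod_cast hilt)]
      rw [List.getElem?_eq_getElem (by omega)]
      rfl
    · intro j hj
      left
      have hperm := (PySem.List.sorted_perm ((PySem.List.pyRange 0 (queries.length : Int) 1).map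
        (fun i => (PySem.List.pyGetD queries i 0, i))) (fun x => x.1) false).map Prod.snd
      rw [hperm.mem_iff]
      simp only [List.map_map]
      have : ((j : Int)) ∈ PySem.List.pyRange 0 (queries.length : Int) 1 := by
        rw [PySem.List.mem_pyRange_one]
        constructor
        · exact_mod_cast Nat.zero_le j
        · exact_mod_cast hj
      refine List.mem_map.2 ⟨(j : Int), this, rfl⟩
  · intro v hC
    have hsh0 : pvShape grid (List.replicate grid.length
        (List.replicate (grid.headD []).length false)) := by
      constructor
      · simp
      · intro row hrow
        rw [List.eq_of_mem_replicate hrow]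
        simp
    refine ⟨by simp, by simp, ⟨pvShape_set grid _ hsh0 0 0 (pvOrig_inb grid hpre), ?_⟩,
      by simp, by simp, ?_, by simp, by simp⟩
    · intro p hp
      rw [pvVisAt_init grid hpre p.1 p.2 hp]
      simp [Prod.ext_iff]
    · intro p hp
      simp only [List.nil_append, List.mem_singleton] at hp
      subst hp
      exact ⟨pvOrig_inb grid hpre, Or.inl rfl⟩

-- ===== VERDICT (by name: the statement is the Claim_ definition above) =====
theorem maxPoints_20250328_spec : Claim_equal_maxPoints_20250328 := by
  intro grid queries _ hpre
  unfold Spec_maxPoints_20250328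
  have hpre' : pvPre grid := ⟨hpre.1, hpre.2.1⟩
  rw [pvA_eq_map grid queries hpre', pvAlt_eq_map grid queries hpre']
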